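-- pv_equiv track=rewrite | github.com/Rajsai1609/scraper-2.0-agent | step3_multi_scorer.py | _detect_student_domain
-- ===== SOURCE A (Python) =====
-- _DOMAIN_KEYWORDS: dict[str, list[str]] = {
--     "sap":           ["sap", "s/4hana", "hana", "abap", "sap basis", "sap fi", "sap co",
--                       "fico", "sap mm", "sap sd", "sap pp", "sap ewm", "bw/4hana"],
--     "bi":            ["bi analyst", "business intelligence", "bi developer", "tableau",
--                       "power bi", "qlik", "looker", "microstrategy", "cognos",
--                       "data visualization"],
--     "data_engineer": ["data engineer", "data engineering", "etl", "data pipeline",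
--                       "apache airflow", "apache spark", "databricks", "kafka", "dbt",
--                       "data warehouse"],
--     "data_analyst":  ["data analyst", "data analysis", "sql analyst", "analytics analyst"],
--     "java":          ["java developer", "java engineer", "spring boot", "j2ee", "hibernate"],
--     "python_dev":    ["python developer", "python engineer", "django", "fastapi"],
--     "react":         ["react developer", "frontend developer", "react engineer",
--                       "vue developer", "angular developer", "ui developer"],
--     "devops":        ["devops engineer", "cloud engineer", "site reliability", "sre",
--                       "platform engineer", "infrastructure engineer", "devsecops"],
--     "ml":            ["machine learning", "ml engineer", "data scientist", "mlops",
--                       "deep learning", "ai engineer"],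
-- }
--
-- def _detect_student_domain(resume_text: str, skills: list[str]) -> str | None:
--     """
--     Return the dominant job domain if one clearly outweighs all others.
--     'Dominant' = top domain has ≥3× the keyword hits of the second-best domain.
--     Returns None when the student appears multi-domain or domain is ambiguous.
--     """
--     combined = (resume_text + " " + " ".join(skills)).lower()
--     counts: dict[str, int] = {
--         domain: sum(1 for kw in keywords if kw in combined)
--         for domain, keywords in _DOMAIN_KEYWORDS.items()
--     }
--     counts = {d: c for d, c in counts.items() if c > 0}
--     if not counts:
--         return None
--     ranked = sorted(counts.items(), key=lambda x: x[1], reverse=True)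
--     top_domain, top_hits = ranked[0]
--     if len(ranked) == 1 or top_hits >= 3 * ranked[1][1]:
--         return top_domain
--     return None
-- ===== SOURCE B (Python) =====
-- _KEYWORD_DOMAIN: list[tuple[str, str]] = [
--     ('sap', 'sap'),
--     ('s/4hana', 'sap'),
--     ('hana', 'sap'),
--     ('abap', 'sap'),
--     ('sap basis', 'sap'),
--     ('sap fi', 'sap'),
--     ('sap co', 'sap'),
--     ('fico', 'sap'),
--     ('sap mm', 'sap'),
--     ('sap sd', 'sap'),
--     ('sap pp', 'sap'),
--     ('sap ewm', 'sap'),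
--     ('bw/4hana', 'sap'),
--     ('bi analyst', 'bi'),
--     ('business intelligence', 'bi'),
--     ('bi developer', 'bi'),
--     ('tableau', 'bi'),
--     ('power bi', 'bi'),
--     ('qlik', 'bi'),
--     ('looker', 'bi'),
--     ('microstrategy', 'bi'),
--     ('cognos', 'bi'),
--     ('data visualization', 'bi'),
--     ('data engineer', 'data_engineer'),
--     ('data engineering', 'data_engineer'),
--     ('etl', 'data_engineer'),
--     ('data pipeline', 'data_engineer'),
--     ('apache airflow', 'data_engineer'),
--     ('apache spark', 'data_engineer'),
--     ('databricks', 'data_engineer'),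
--     ('kafka', 'data_engineer'),
--     ('dbt', 'data_engineer'),
--     ('data warehouse', 'data_engineer'),
--     ('data analyst', 'data_analyst'),
--     ('data analysis', 'data_analyst'),
--     ('sql analyst', 'data_analyst'),
--     ('analytics analyst', 'data_analyst'),
--     ('java developer', 'java'),
--     ('java engineer', 'java'),
--     ('spring boot', 'java'),
--     ('j2ee', 'java'),
--     ('hibernate', 'java'),
--     ('python developer', 'python_dev'),
--     ('python engineer', 'python_dev'),
--     ('django', 'python_dev'),
--     ('fastapi', 'python_dev'),
--     ('react developer', 'react'),
--     ('frontend developer', 'react'),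
--     ('react engineer', 'react'),
--     ('vue developer', 'react'),
--     ('angular developer', 'react'),
--     ('ui developer', 'react'),
--     ('devops engineer', 'devops'),
--     ('cloud engineer', 'devops'),
--     ('site reliability', 'devops'),
--     ('sre', 'devops'),
--     ('platform engineer', 'devops'),
--     ('infrastructure engineer', 'devops'),
--     ('devsecops', 'devops'),
--     ('machine learning', 'ml'),
--     ('ml engineer', 'ml'),
--     ('data scientist', 'ml'),
--     ('mlops', 'ml'),
--     ('deep learning', 'ml'),
--     ('ai engineer', 'ml'),
-- ]
--
--
-- def _detect_student_domain(resume_text: str, skills: list[str]) -> str | None: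
--     # B: one scan over a transposed flat (keyword, domain) table (grouped by domain),
--     # run-length grouping the hits per domain while tracking the first-seen strict
--     # maximum and the largest / second-largest hit counts; no dict, no filter, no sort.
--     combined = (resume_text + " " + " ".join(skills)).lower()
--     best = None
--     best_hits = 0
--     second = 0
--     cur_dom = None
--     cur_hits = 0
--     for kw, dom in _KEYWORD_DOMAIN:
--         if cur_dom != dom:
--             if cur_hits > best_hits:
--                 best, best_hits, second = cur_dom, cur_hits, best_hits
--             elif cur_hits > second:
--                 second = cur_hits
--             cur_dom, cur_hits = dom, 0
--         if kw in combined: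
--             cur_hits += 1
--     if cur_hits > best_hits:
--         best, best_hits, second = cur_dom, cur_hits, best_hits
--     elif cur_hits > second:
--         second = cur_hits
--     if best is not None and best_hits >= 3 * second:
--         return best
--     return None
-- ===== Notes on version B (the rewrite author's own statement) =====
-- stated objective: alternative
-- what changed: Replaces the per-domain counts dict + positivity filter + stable descending sort + ranked-index dominance test by a single run-length scan over a transposed flat (keyword, domain) table, tracking the first-seen strict-maximum domain and the largest and second-largest hit counts; no dict, no filter, no sort.
import Mathlib
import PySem

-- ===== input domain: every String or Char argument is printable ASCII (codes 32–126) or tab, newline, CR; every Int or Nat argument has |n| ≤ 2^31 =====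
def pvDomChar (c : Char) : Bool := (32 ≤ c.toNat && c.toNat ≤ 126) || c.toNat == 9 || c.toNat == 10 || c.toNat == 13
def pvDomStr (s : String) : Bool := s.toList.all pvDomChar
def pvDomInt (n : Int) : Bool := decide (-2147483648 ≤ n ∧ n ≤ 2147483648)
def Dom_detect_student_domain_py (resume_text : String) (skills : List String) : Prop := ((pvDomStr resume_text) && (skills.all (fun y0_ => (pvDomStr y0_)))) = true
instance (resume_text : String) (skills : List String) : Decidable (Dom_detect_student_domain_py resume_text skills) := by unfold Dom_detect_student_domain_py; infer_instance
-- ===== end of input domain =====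

-- B replaces A's per-domain counts dict + positivity filter + stable sort + ranked-index
-- test by one run-length scan over a transposed flat (keyword, domain) table that tracks
-- the first-seen strict-maximum domain and the two largest hit counts (objective:
-- alternative decomposition, same cost at the fixed table size).

-- ===== PORT A =====
-- the module constant _DOMAIN_KEYWORDS (A's Python iterates domain -> keyword list)
def pvKeywordTable : List (String × List String) :=
  [("sap", ["sap", "s/4hana", "hana", "abap", "sap basis", "sap fi", "sap co",
            "fico", "sap mm", "sap sd", "sap pp", "sap ewm", "bw/4hana"]),
   ("bi", ["bi analyst", "business intelligence", "bi developer", "tableau",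
           "power bi", "qlik", "looker", "microstrategy", "cognos",
           "data visualization"]),
   ("data_engineer", ["data engineer", "data engineering", "etl", "data pipeline",
                      "apache airflow", "apache spark", "databricks", "kafka", "dbt",
                      "data warehouse"]),
   ("data_analyst", ["data analyst", "data analysis", "sql analyst", "analytics analyst"]),
   ("java", ["java developer", "java engineer", "spring boot", "j2ee", "hibernate"]),
   ("python_dev", ["python developer", "python engineer", "django", "fastapi"]),
   ("react", ["react developer", "frontend developer", "react engineer",
              "vue developer", "angular developer", "ui developer"]),
   ("devops", ["devops engineer", "cloud engineer", "site reliability", "sre",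
               "platform engineer", "infrastructure engineer", "devsecops"]),
   ("ml", ["machine learning", "ml engineer", "data scientist", "mlops",
           "deep learning", "ai engineer"])]

def detect_student_domain_py (resume_text : String) (skills : List String) : Option String :=
  -- combined = (resume_text + " " + " ".join(skills)).lower()
  let combined := PySem.Chars.lower (resume_text.toList ++ [' '] ++ PySem.Chars.join [' '] (skills.map String.toList))
  -- counts = {domain: sum(1 for kw in keywords if kw in combined) ...}
  let counts : List (String × Int) :=
    pvKeywordTable.map (fun p => (p.1, (p.2.countP (fun kw => PySem.Chars.isIn kw.toList combined) : Int)))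
  -- counts = {d: c for d, c in counts.items() if c > 0}; 'if not counts: return None'
  -- is subsumed by the [] branch of the match (sorted [] = [])
  let counts' := counts.filter (fun p => decide (0 < p.2))
  match PySem.List.sorted counts' (fun x => x.2) true with
  | [] => none
  | [top] => some top.1
  | top :: second :: _ => if top.2 ≥ 3 * second.2 then some top.1 else none

-- ===== PORT B =====
-- B's module constant _KEYWORD_DOMAIN: the transposed flat (keyword, domain) table,
-- grouped by domain in the original domain order
def pvKeywordPairs : List (String × String) :=
  [("sap", "sap"), ("s/4hana", "sap"), ("hana", "sap"), ("abap", "sap"),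
   ("sap basis", "sap"), ("sap fi", "sap"), ("sap co", "sap"), ("fico", "sap"),
   ("sap mm", "sap"), ("sap sd", "sap"), ("sap pp", "sap"), ("sap ewm", "sap"),
   ("bw/4hana", "sap"),
   ("bi analyst", "bi"), ("business intelligence", "bi"), ("bi developer", "bi"),
   ("tableau", "bi"), ("power bi", "bi"), ("qlik", "bi"), ("looker", "bi"),
   ("microstrategy", "bi"), ("cognos", "bi"), ("data visualization", "bi"),
   ("data engineer", "data_engineer"), ("data engineering", "data_engineer"),
   ("etl", "data_engineer"), ("data pipeline", "data_engineer"),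
   ("apache airflow", "data_engineer"), ("apache spark", "data_engineer"),
   ("databricks", "data_engineer"), ("kafka", "data_engineer"),
   ("dbt", "data_engineer"), ("data warehouse", "data_engineer"),
   ("data analyst", "data_analyst"), ("data analysis", "data_analyst"),
   ("sql analyst", "data_analyst"), ("analytics analyst", "data_analyst"),
   ("java developer", "java"), ("java engineer", "java"), ("spring boot", "java"),
   ("j2ee", "java"), ("hibernate", "java"),
   ("python developer", "python_dev"), ("python engineer", "python_dev"),
   ("django", "python_dev"), ("fastapi", "python_dev"),
   ("react developer", "react"), ("frontend developer", "react"),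
   ("react engineer", "react"), ("vue developer", "react"),
   ("angular developer", "react"), ("ui developer", "react"),
   ("devops engineer", "devops"), ("cloud engineer", "devops"),
   ("site reliability", "devops"), ("sre", "devops"),
   ("platform engineer", "devops"), ("infrastructure engineer", "devops"),
   ("devsecops", "devops"),
   ("machine learning", "ml"), ("ml engineer", "ml"), ("data scientist", "ml"),
   ("mlops", "ml"), ("deep learning", "ml"), ("ai engineer", "ml")]

-- Python's post-loop / domain-change flush of the current run into (best, best_hits, second)
def pvFlush (best : Option String) (bh sec : Int) (cd : Option String) (ch : Int) :
    Option String × Int × Int :=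
  if bh < ch then (cd, ch, bh)
  else if sec < ch then (best, bh, ch)
  else (best, bh, sec)

-- the for-loop of Source B as structural recursion over the remaining (keyword, domain) pairs;
-- state = (best, best_hits, second, cur_dom, cur_hits)
def pvScan (combined : List Char) :
    List (String × String) → Option String → Int → Int → Option String → Int →
    Option String × Int × Int × Option String × Int
  | [], best, bh, sec, cd, ch => (best, bh, sec, cd, ch)
  | (kw, dom) :: rest, best, bh, sec, cd, ch =>
    if cd ≠ some dom then
      -- flush the finished run, start a new one for dom, then 'if kw in combined: cur_hits += 1'
      match pvFlush best bh sec cd ch with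
      | (b2, bh2, sec2) =>
        pvScan combined rest b2 bh2 sec2 (some dom)
          (if PySem.Chars.isIn kw.toList combined then 1 else 0)
    else
      pvScan combined rest best bh sec cd
        (if PySem.Chars.isIn kw.toList combined then ch + 1 else ch)

def detect_student_domain_py_alt (resume_text : String) (skills : List String) : Option String :=
  -- combined = (resume_text + " " + " ".join(skills)).lower()
  let combined := PySem.Chars.lower (resume_text.toList ++ [' '] ++ PySem.Chars.join [' '] (skills.map String.toList))
  match pvScan combined pvKeywordPairs none 0 0 none 0 with
  | (best, bh, sec, cd, ch) =>
    -- final flush, then 'if best is not None and best_hits >= 3 * second'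
    match pvFlush best bh sec cd ch with
    | (some b, bh2, sec2) => if bh2 ≥ 3 * sec2 then some b else none
    | (none, _, _) => none

-- ===== PRECONDITION & SPEC =====
def Spec_detect_student_domain_py (resume_text : String) (skills : List String) (out : Option String) : Prop := out = detect_student_domain_py_alt resume_text skills
instance (resume_text : String) (skills : List String) (out : Option String) : Decidable (Spec_detect_student_domain_py resume_text skills out) := by unfold Spec_detect_student_domain_py; infer_instance

-- ===== CLAIM (what is proved, stated in full; the proofs are below) =====
def Claim_equal_detect_student_domain_py : Prop := ∀ (resume_text : String) (skills : List String), Dom_detect_student_domain_py resume_text skills → Spec_detect_student_domain_py resume_text skills (detect_student_domain_py resume_text skills)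

-- ===== LEMMAS AND PROOFS =====

-- A-side abstraction: one sorted-insertion step per positive (domain, hits) pair,
-- seen through the scan state (best, best_hits, second)
def pvStep (st : Option String × Int × Int) (x : String × Int) : Option String × Int × Int :=
  if st.2.1 < x.2 then (some x.1, x.2, st.2.1)
  else if st.2.2 < x.2 then (st.1, st.2.1, x.2)
  else st

-- invariant tying the scan state to A's (filtered, descending-sorted) accumulator
def pvInv (acc : List (String × Int)) (st : Option String × Int × Int) : Prop :=
  st.1 = acc.head?.map (·.1) ∧
  st.2.1 = ((acc.map (·.2)).headD 0) ∧
  st.2.2 = (((acc.map (·.2)).drop 1).headD 0) ∧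
  0 ≤ st.2.1 ∧ 0 ≤ st.2.2

theorem pvInv_step (acc : List (String × Int)) (st : Option String × Int × Int)
    (h : pvInv acc st) (x : String × Int) :
    pvInv (if decide (0 < x.2) = true
             then PySem.List.insertBy (fun a b => decide (b.2 < a.2)) x acc else acc)
          (pvStep st x) := by
  obtain ⟨h1, h2, h3, h4, h5⟩ := h
  by_cases hx : 0 < x.2
  · simp only [hx, decide_true, if_true]
    match acc with
    | [] =>
      simp at h1 h2 h3
      simp [pvInv, pvStep, PySem.List.insertBy, h2, hx, le_of_lt hx]
    | [a] =>
      simp at h1 h2 h3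
      by_cases hax : a.2 < x.2
      · simp [pvInv, pvStep, PySem.List.insertBy, h2, hax, le_of_lt hx]
        omega
      · simp [pvInv, pvStep, PySem.List.insertBy, h1, h2, h3, hax, hx, le_of_lt hx]
        omega
    | a :: b :: rest =>
      simp at h1 h2 h3
      by_cases hax : a.2 < x.2
      · simp [pvInv, pvStep, PySem.List.insertBy, h2, hax, le_of_lt hx]
        omega
      · by_cases hbx : b.2 < x.2
        · simp [pvInv, pvStep, PySem.List.insertBy, h2, h3, hax, hbx, le_of_lt hx]
          exact ⟨h1, by omega⟩
        · simp [pvInv, pvStep, PySem.List.insertBy, h2, h3, hax, hbx]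
          exact ⟨h1, by omega, by omega⟩
  · have hs : pvStep st x = st := by
      simp only [pvStep]
      rw [if_neg (by omega), if_neg (by omega)]
    simp [hx, hs]
    exact ⟨h1, h2, h3, h4, h5⟩

theorem pvInv_foldl (l : List (String × Int)) (acc : List (String × Int))
    (st : Option String × Int × Int) (h : pvInv acc st) :
    pvInv (l.foldl (fun acc x => if decide (0 < x.2) = true
                      then PySem.List.insertBy (fun a b => decide (b.2 < a.2)) x acc else acc) acc)
          (l.foldl pvStep st) := by
  induction l generalizing acc st with
  | nil => exact h
  | cons x t ih => exact ih _ _ (pvInv_step acc st h x)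

-- A's sorted/filter tail agrees with the pvStep fold on ANY (domain, hits) list
theorem pv_core (l : List (String × Int)) :
    (match PySem.List.sorted (l.filter (fun p => decide (0 < p.2))) (fun x => x.2) true with
     | [] => (none : Option String)
     | [top] => some top.1
     | top :: second :: _ => if top.2 ≥ 3 * second.2 then some top.1 else none)
    = (match (l.foldl pvStep ((none : Option String), (0 : Int), (0 : Int))).1 with
       | none => none
       | some best =>
         if (l.foldl pvStep ((none : Option String), (0 : Int), (0 : Int))).2.1
              ≥ 3 * (l.foldl pvStep ((none : Option String), (0 : Int), (0 : Int))).2.2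
         then some best else none) := by
  have hrank : PySem.List.sorted (l.filter (fun p => decide (0 < p.2))) (fun x => x.2) true
      = l.foldl (fun acc x => if decide (0 < x.2) = true
                    then PySem.List.insertBy (fun a b => decide (b.2 < a.2)) x acc else acc) [] := by
    rw [PySem.List.sorted_rev_eq_foldl_insertBy, List.foldl_filter]
  have hinv := pvInv_foldl l [] ((none : Option String), (0 : Int), (0 : Int))
    (by simp [pvInv])
  rw [← hrank] at hinv
  obtain ⟨h1, h2, h3, h4, h5⟩ := hinv
  match hm : PySem.List.sorted (l.filter (fun p => decide (0 < p.2))) (fun x => x.2) true with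
  | [] =>
    rw [hm] at h1 ⊢; simp at h1
    simp [h1]
  | [top] =>
    rw [hm] at h1 h2 h3 ⊢; simp at h1 h2 h3
    simp [h1, h2, h3]
    omega
  | top :: second :: rest =>
    rw [hm] at h1 h2 h3 ⊢; simp at h1 h2 h3
    simp [h1, h2, h3]

-- flushing a run whose domain is known is exactly a pvStep
theorem pvFlush_step (t : Option String × Int × Int) (d : String) (c : Int) :
    pvFlush t.1 t.2.1 t.2.2 (some d) c = pvStep t (d, c) := by
  obtain ⟨b, h, s⟩ := t
  rfl

-- B's scan through one domain's remaining keywords only accumulates cur_hits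
theorem pvScan_run (c : List Char) (kws : List String) (d : String)
    (rest : List (String × String)) (best : Option String) (bh sec : Int) (ch : Int) :
    pvScan c (kws.map (fun kw => (kw, d)) ++ rest) best bh sec (some d) ch
    = pvScan c rest best bh sec (some d)
        (ch + (kws.countP (fun kw => PySem.Chars.isIn kw.toList c) : Int)) := by
  induction kws generalizing ch with
  | nil => simp
  | cons k t ih =>
    simp only [List.map_cons, List.cons_append, pvScan]
    rw [if_neg (show ¬ (some d ≠ some d) by simp), ih]
    congr 1
    simp only [List.countP_cons]
    by_cases hk : PySem.Chars.isIn k.toList c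
    · simp only [hk, if_true]
      push_cast
      omega
    · simp only [hk]
      push_cast
      omega

-- B's scan through a whole nonempty domain group = flush, then count the group
theorem pvScan_group (c : List Char) (k : String) (t : List String) (d : String)
    (rest : List (String × String)) (best : Option String) (bh sec : Int)
    (cd : Option String) (ch : Int) (hcd : cd ≠ some d) :
    pvScan c ((k :: t).map (fun kw => (kw, d)) ++ rest) best bh sec cd ch
    = pvScan c rest (pvFlush best bh sec cd ch).1 (pvFlush best bh sec cd ch).2.1
        (pvFlush best bh sec cd ch).2.2 (some d)
        (((k :: t).countP (fun kw => PySem.Chars.isIn kw.toList c) : Int)) := by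
  rcases hf : pvFlush best bh sec cd ch with ⟨b2, bh2, sec2⟩
  simp only [List.map_cons, List.cons_append, pvScan, if_pos hcd, hf]
  rw [pvScan_run]
  congr 1
  simp only [List.countP_cons]
  by_cases hk : PySem.Chars.isIn k.toList c
  · simp only [hk, if_true]
    push_cast
    omega
  · simp only [hk]
    push_cast
    omega

-- grouping shape of the table: every keyword list nonempty, domains change at each group
def pvOkB (cd : Option String) : List (String × List String) → Bool
  | [] => true
  | (d, kws) :: rest => (!kws.isEmpty) && (!(cd == some d)) && pvOkB (some d) rest

def pvFlat (t : List (String × List String)) : List (String × String) :=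
  t.flatMap (fun p => p.2.map (fun kw => (kw, p.1)))

-- the scan over the flattened table, flushed at the end, is the pvStep fold over the counts
theorem pvScan_table (c : List Char) (t : List (String × List String)) :
    ∀ (best : Option String) (bh sec : Int) (cd : Option String) (ch : Int),
    pvOkB cd t = true →
    (match pvScan c (pvFlat t) best bh sec cd ch with
     | (b, h, s, cd2, ch2) => pvFlush b h s cd2 ch2)
    = (t.map (fun p => (p.1, (p.2.countP (fun kw => PySem.Chars.isIn kw.toList c) : Int)))).foldl
        pvStep (pvFlush best bh sec cd ch) := by
  induction t with
  | nil => intro best bh sec cd ch _; simp [pvFlat, pvScan]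
  | cons p rest ih =>
    intro best bh sec cd ch hok
    obtain ⟨d, kws⟩ := p
    simp only [pvOkB, Bool.and_eq_true] at hok
    obtain ⟨⟨hne, hcd⟩, hrest⟩ := hok
    have hne' : kws ≠ [] := by simpa using hne
    have hcd' : cd ≠ some d := by simpa using hcd
    cases kws with
    | nil => exact absurd rfl hne'
    | cons k tk =>
      have hflat : pvFlat ((d, k :: tk) :: rest)
          = (k :: tk).map (fun kw => (kw, d)) ++ pvFlat rest := by
        simp [pvFlat]
      rw [hflat, pvScan_group c k tk d _ best bh sec cd ch hcd',
        ih _ _ _ _ _ hrest]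
      simp only [List.map_cons, List.foldl_cons]
      rw [pvFlush_step]

-- the literal pair table is the flattening of A's table
theorem pvPairs_flat : pvKeywordPairs = pvFlat pvKeywordTable := by decide

theorem pvOk_table : ∀ cd0 : Option String, cd0 = none → pvOkB cd0 pvKeywordTable = true := by
  intro cd0 h; subst h; decide

-- the two entry bodies agree for any combined character list
theorem pv_main (c : List Char) :
    (let counts : List (String × Int) :=
       pvKeywordTable.map (fun p => (p.1, (p.2.countP (fun kw => PySem.Chars.isIn kw.toList c) : Int)));
     let counts' := counts.filter (fun p => decide (0 < p.2));
     match PySem.List.sorted counts' (fun x => x.2) true with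
     | [] => (none : Option String)
     | [top] => some top.1
     | top :: second :: _ => if top.2 ≥ 3 * second.2 then some top.1 else none)
    = (match pvScan c pvKeywordPairs none 0 0 none 0 with
       | (best, bh, sec, cd, ch) =>
         match pvFlush best bh sec cd ch with
         | (some b, bh2, sec2) => if bh2 ≥ 3 * sec2 then some b else none
         | (none, _, _) => none) := by
  simp only
  rw [pv_core]
  have htab := pvScan_table c pvKeywordTable none 0 0 none 0 (pvOk_table none rfl)
  have hinit : pvFlush none 0 0 none 0 = ((none : Option String), (0 : Int), (0 : Int)) := rfl
  rw [hinit] at htab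
  rw [pvPairs_flat]
  rcases hsc : pvScan c (pvFlat pvKeywordTable) none 0 0 none 0 with ⟨b, h, s, cd2, ch2⟩
  rw [hsc] at htab
  simp only at htab
  rw [← htab]
  rcases hfl : pvFlush b h s cd2 ch2 with ⟨b3, h3, s3⟩
  cases b3 <;> rfl

-- ===== VERDICT (by name: the statement is the Claim_ definition above) =====
theorem detect_student_domain_py_spec : Claim_equal_detect_student_domain_py := by
  intro resume_text skills _
  unfold Spec_detect_student_domain_py detect_student_domain_py detect_student_domain_py_alt
  exact pv_main (PySem.Chars.lower (resume_text.toList ++ [' '] ++ PySem.Chars.join [' '] (skills.map String.toList)))
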